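-- pv_equiv track=rewrite | github.com/hiro877/Gypsophila-LAD | logs/utils/SequenceAnomalyDetector.py | detect_anomaly_event_cycles
-- ===== SOURCE A (Python) =====
-- def generate_all_rotations_(normal_order):
--     """
--     与えられた順序のすべての回転（循環シフト）を生成する。
--     """
--     rotations = []
--     n = len(normal_order)
--     for i in range(n):
--         rotation = tuple(normal_order[i:] + normal_order[:i])
--         rotations.append(rotation)
--     return rotations
--
-- def detect_anomaly_event_cycles(sessions, normal_order, session_lines):
--     """
--     正常なイベント順序から外れたセッションを検出し、ズレたイベントの行番号も取得する。
--     循環シフトされた順序も正常とみなす。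
--     """
--     anomalies = []
--     anomaly_indexes = []
--     shifted_event_lines = []
--
--     # 正常な順序のすべての回転（循環シフト）を生成
--     all_rotations = generate_all_rotations_(normal_order)
--
--     for idx, session in enumerate(sessions):
--         if tuple(session) not in all_rotations:
--             anomalies.append(session)
--             anomaly_indexes.append(idx)
--             # セッション内のズレた行番号列を取得
--             shifted_event_lines.append(session_lines[idx])
--
--     return anomalies, shifted_event_lines
-- ===== SOURCE B (Python) =====
-- def detect_anomaly_event_cycles(sessions, normal_order, session_lines):
--     """Canonical-form comparison: two sequences are cyclic rotations of each
--     other iff their lexicographically least rotations coincide, so each session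
--     is reduced to this canonical rotation and compared against the reference's
--     canonical rotation; no membership test over a rotation table is performed."""
--     n = len(normal_order)
--     ref = min(tuple(normal_order[i:] + normal_order[:i]) for i in range(n)) if n else None
--
--     anomalies = []
--     shifted_event_lines = []
--     for idx, session in enumerate(sessions):
--         ok = (ref is not None and len(session) == n
--               and min(tuple(session[i:] + session[:i]) for i in range(n)) == ref)
--         if not ok:
--             anomalies.append(session)
--             shifted_event_lines.append(session_lines[idx])
--     return anomalies, shifted_event_lines
-- ===== Notes on version B (the rewrite author's own statement) =====
-- stated objective: alternative
-- what changed: Replaces A's membership test of each session in a precomputed table of all rotations by a canonical-form algorithm: both the reference and each session are reduced to their lexicographically least rotation, and a session is normal iff its canonical rotation equals the reference's (computed once); correctness rests on least rotations being unique representatives of rotation-equivalence classes.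
import Mathlib
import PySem

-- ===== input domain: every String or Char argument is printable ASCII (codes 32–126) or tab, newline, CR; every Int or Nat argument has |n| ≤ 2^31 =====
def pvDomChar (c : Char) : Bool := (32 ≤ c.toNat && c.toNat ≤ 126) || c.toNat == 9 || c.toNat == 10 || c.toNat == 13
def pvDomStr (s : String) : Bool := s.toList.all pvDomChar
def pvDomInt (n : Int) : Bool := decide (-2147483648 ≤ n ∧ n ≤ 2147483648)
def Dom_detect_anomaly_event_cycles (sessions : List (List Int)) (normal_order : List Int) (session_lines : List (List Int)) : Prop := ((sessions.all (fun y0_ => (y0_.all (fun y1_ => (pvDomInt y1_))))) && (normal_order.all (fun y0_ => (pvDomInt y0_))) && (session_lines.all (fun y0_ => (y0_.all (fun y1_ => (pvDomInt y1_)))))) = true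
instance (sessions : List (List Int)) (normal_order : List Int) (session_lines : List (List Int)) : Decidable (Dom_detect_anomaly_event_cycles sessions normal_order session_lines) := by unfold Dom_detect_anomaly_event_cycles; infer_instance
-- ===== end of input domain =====

-- B replaces A's rotation-table membership test by comparing lexicographically least rotations (canonical forms); objective: alternative.


-- ===== PORT A =====
def generate_all_rotations_ (normal_order : List Int) : List (List Int) :=
  (PySem.List.pyRange 0 normal_order.length 1).foldl
    (fun rotations i =>
      rotations ++ [PySem.List.slice normal_order (some i) none ++ PySem.List.slice normal_order none (some i)])
    []

def detect_anomaly_event_cycles (sessions : List (List Int)) (normal_order : List Int) (session_lines : List (List Int)) : List (List Int) × List (List Int) :=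
  let all_rotations := generate_all_rotations_ normal_order
  let st := (PySem.List.enumerate sessions 0).foldl
    (fun (st : List (List Int) × List Int × List (List Int)) p =>
      if p.2 ∉ all_rotations then
        (st.1 ++ [p.2], st.2.1 ++ [p.1], st.2.2 ++ [PySem.List.pyGetD session_lines p.1 []])
      else st)
    ([], [], [])
  (st.1, st.2.2)

-- ===== PORT B =====
-- Python's tuple '<' on int tuples, exact (lexicographic, shorter prefix is smaller).
def pyLexLt : List Int → List Int → Bool
  | _, [] => false
  | [], _ :: _ => true
  | a :: as, b :: bs => if a < b then true else if b < a then false else pyLexLt as bs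

-- min(tuple(seq[i:] + seq[:i]) for i in range(len(seq))) — Python's min keeps the first minimum;
-- the [] branch corresponds to min() over the empty generator, which B never evaluates.
def canonical_rotation (seq : List Int) : List Int :=
  match (PySem.List.pyRange 0 seq.length 1).map
      (fun i => PySem.List.slice seq (some i) none ++ PySem.List.slice seq none (some i)) with
  | [] => []
  | r :: rs => rs.foldl (fun m x => if pyLexLt x m then x else m) r

def detect_anomaly_event_cycles_alt (sessions : List (List Int)) (normal_order : List Int) (session_lines : List (List Int)) : List (List Int) × List (List Int) :=
  let n := normal_order.length
  let ref : Option (List Int) := if n ≠ 0 then some (canonical_rotation normal_order) else none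
  (PySem.List.enumerate sessions 0).foldl
    (fun (st : List (List Int) × List (List Int)) p =>
      let ok := match ref with
        | some r => p.2.length == n && canonical_rotation p.2 == r
        | none => false
      if !ok then (st.1 ++ [p.2], st.2 ++ [PySem.List.pyGetD session_lines p.1 []]) else st)
    ([], [])

-- ===== PRECONDITION & SPEC =====
-- Pre_ excludes exactly the inputs where A raises IndexError: an anomalous session whose
-- index has no entry in session_lines (B raises there too).
def Pre_detect_anomaly_event_cycles (sessions : List (List Int)) (normal_order : List Int) (session_lines : List (List Int)) : Prop :=
  ∀ i ∈ List.range sessions.length,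
    sessions.getD i [] ∈ (List.range normal_order.length).map
      (fun k => normal_order.drop k ++ normal_order.take k) ∨ i < session_lines.length
instance (sessions : List (List Int)) (normal_order : List Int) (session_lines : List (List Int)) : Decidable (Pre_detect_anomaly_event_cycles sessions normal_order session_lines) := by unfold Pre_detect_anomaly_event_cycles; infer_instance

def pvWitness_detect_anomaly_event_cycles : List (List Int) × List Int × List (List Int) :=
  ([[1, 2], [2, 1], [2, 2]], [1, 2], [[10], [20], [30]])

def Spec_detect_anomaly_event_cycles (sessions : List (List Int)) (normal_order : List Int) (session_lines : List (List Int)) (out : List (List Int) × List (List Int)) : Prop := out = detect_anomaly_event_cycles_alt sessions normal_order session_lines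
instance (sessions : List (List Int)) (normal_order : List Int) (session_lines : List (List Int)) (out : List (List Int) × List (List Int)) : Decidable (Spec_detect_anomaly_event_cycles sessions normal_order session_lines out) := by unfold Spec_detect_anomaly_event_cycles; infer_instance

-- ===== CLAIM (what is proved, stated in full; the proofs are below) =====
def Claim_equal_detect_anomaly_event_cycles : Prop := ∀ (sessions : List (List Int)) (normal_order : List Int) (session_lines : List (List Int)), Dom_detect_anomaly_event_cycles sessions normal_order session_lines → Pre_detect_anomaly_event_cycles sessions normal_order session_lines → Spec_detect_anomaly_event_cycles sessions normal_order session_lines (detect_anomaly_event_cycles sessions normal_order session_lines)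

-- ===== LEMMAS AND PROOFS =====

-- The rotation list, in closed form.
def rotL (l : List Int) : List (List Int) :=
  (List.range l.length).map (fun k => l.drop k ++ l.take k)

theorem rotations_eq (no : List Int) : generate_all_rotations_ no = rotL no := by
  unfold generate_all_rotations_ rotL
  rw [PySem.List.pyRange_one, PySem.List.foldl_append_singleton_eq_map]
  simp [List.map_map, Function.comp, PySem.List.slice_from_natCast, PySem.List.slice_to_natCast]

-- min of a nonempty list of int lists under pyLexLt, Python min's first-minimum rule.
def lminL : List (List Int) → List Int
  | [] => []
  | r :: rs => rs.foldl (fun m x => if pyLexLt x m then x else m) r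

theorem canon_eq (l : List Int) : canonical_rotation l = lminL (rotL l) := by
  unfold canonical_rotation rotL lminL
  rw [PySem.List.pyRange_one]
  simp [List.map_map, Function.comp_def, PySem.List.slice_from_natCast, PySem.List.slice_to_natCast]

-- order facts about pyLexLt
theorem pyLexLt_irrefl : ∀ a, pyLexLt a a = false := by
  intro a; induction a with
  | nil => rfl
  | cons x xs ih => simp [pyLexLt, ih]

theorem pyLexLt_trans : ∀ a b c, pyLexLt a b = true → pyLexLt b c = true → pyLexLt a c = true := by
  intro a
  induction a with
  | nil => intro b c h1 h2; cases c with
    | nil => cases b <;> simp [pyLexLt] at h1 h2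
    | cons _ _ => simp [pyLexLt]
  | cons x xs ih =>
    intro b c h1 h2
    cases b with
    | nil => simp [pyLexLt] at h1
    | cons y ys =>
      cases c with
      | nil => simp [pyLexLt] at h2
      | cons z zs =>
        simp only [pyLexLt] at h1 h2 ⊢
        split_ifs at h1 h2 ⊢ <;>
          first | rfl | omega | exact ih ys zs h1 h2

theorem pyLexLt_antisymm : ∀ a b, pyLexLt a b = false → pyLexLt b a = false → a = b := by
  intro a
  induction a with
  | nil => intro b h1 _; cases b with
    | nil => rfl
    | cons _ _ => simp [pyLexLt] at h1
  | cons x xs ih =>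
    intro b h1 h2
    cases b with
    | nil => simp [pyLexLt] at h2
    | cons y ys =>
      simp only [pyLexLt] at h1 h2
      split_ifs at h1 h2 <;> try omega
      have : x = y := by omega
      subst this
      rw [ih ys h1 h2]

-- totality: a < c → a < b ∨ b < c
theorem pyLexLt_or : ∀ a b c, pyLexLt a c = true → pyLexLt a b = true ∨ pyLexLt b c = true := by
  intro a
  induction a with
  | nil => intro b c h; cases b with
    | nil => exact Or.inr h
    | cons _ _ => exact Or.inl (by simp [pyLexLt])
  | cons x xs ih =>
    intro b c h
    cases c with
    | nil => simp [pyLexLt] at h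
    | cons z zs =>
      cases b with
      | nil => exact Or.inr (by simp [pyLexLt])
      | cons y ys =>
        simp only [pyLexLt] at h ⊢
        split_ifs at h ⊢ <;>
          first | exact Or.inl rfl | exact Or.inr rfl | omega | exact ih ys zs h

theorem lminL_mem : ∀ (L : List (List Int)), L ≠ [] → lminL L ∈ L := by
  intro L hL
  cases L with
  | nil => exact absurd rfl hL
  | cons r rs =>
    clear hL
    show rs.foldl (fun m x => if pyLexLt x m then x else m) r ∈ r :: rs
    induction rs generalizing r with
    | nil => simp [List.foldl]
    | cons y ys ih =>
      simp only [List.foldl_cons]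
      by_cases hyr : pyLexLt y r = true
      · rw [if_pos hyr]
        rcases List.mem_cons.mp (ih y) with h' | h'
        · simp [h']
        · simp [h']
      · rw [if_neg hyr]
        rcases List.mem_cons.mp (ih r) with h' | h'
        · simp [h']
        · simp [h']

theorem lminL_not_lt : ∀ (L : List (List Int)) (x : List Int), x ∈ L → pyLexLt x (lminL L) = false := by
  intro L
  cases L with
  | nil => intro x hx; simp at hx
  | cons r rs =>
    show ∀ x, x ∈ r :: rs → pyLexLt x (rs.foldl (fun m x => if pyLexLt x m then x else m) r) = false
    induction rs generalizing r with
    | nil =>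
      intro x hx
      rcases List.mem_cons.mp hx with h | h
      · subst h; simp [List.foldl, pyLexLt_irrefl]
      · simp at h
    | cons y ys ih =>
      intro x hx
      simp only [List.foldl_cons]
      by_cases hyr : pyLexLt y r = true
      · rw [if_pos hyr]
        rcases List.mem_cons.mp hx with h | h
        · -- x = r : y < r and ¬(y < min) force ¬(r < min)
          subst h
          have hy : pyLexLt y (ys.foldl (fun m x => if pyLexLt x m then x else m) y) = false :=
            ih y y (by simp)
          by_contra hc
          simp only [Bool.not_eq_false] at hc
          exact absurd (pyLexLt_trans y x _ hyr hc) (by simp [hy])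
        · exact ih y x h
      · rw [if_neg hyr]
        rcases List.mem_cons.mp hx with h | h
        · subst h; exact ih x x (by simp)
        · rcases List.mem_cons.mp h with h' | h'
          · -- x = y : ¬(y < r) and ¬(r < min) force ¬(y < min)
            subst h'
            have hr : pyLexLt r (ys.foldl (fun m x => if pyLexLt x m then x else m) r) = false :=
              ih r r (by simp)
            by_contra hc
            simp only [Bool.not_eq_false] at hc
            rcases pyLexLt_or x r _ hc with h2 | h2
            · exact absurd h2 (by simp [hyr])
            · exact absurd h2 (by simp [hr])
          · exact ih r x (by simp [h'])

theorem lminL_eq_of_same_mem (L1 L2 : List (List Int)) (h1 : L1 ≠ []) (h2 : L2 ≠ [])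
    (h : ∀ x, x ∈ L1 ↔ x ∈ L2) : lminL L1 = lminL L2 := by
  have m1 := lminL_mem L1 h1
  have m2 := lminL_mem L2 h2
  exact pyLexLt_antisymm _ _
    (lminL_not_lt L2 (lminL L1) ((h _).mp m1))
    (lminL_not_lt L1 (lminL L2) ((h _).mpr m2))

-- rotL membership ↔ Mathlib's IsRotated (for nonempty base)
theorem mem_rotL_iff (l x : List Int) (hl : l ≠ []) : x ∈ rotL l ↔ l ~r x := by
  unfold rotL
  constructor
  · rintro hx
    simp only [List.mem_map, List.mem_range] at hx
    obtain ⟨k, hk, rfl⟩ := hx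
    exact ⟨k, List.rotate_eq_drop_append_take hk.le⟩
  · rintro ⟨m, rfl⟩
    have hlen : 0 < l.length := List.length_pos_iff.mpr hl
    refine List.mem_map.mpr ⟨m % l.length, List.mem_range.mpr (Nat.mod_lt _ hlen), ?_⟩
    rw [← List.rotate_eq_drop_append_take (Nat.mod_lt _ hlen).le, List.rotate_mod]

theorem length_of_mem_rotL (l x : List Int) (hx : x ∈ rotL l) : x.length = l.length := by
  unfold rotL at hx
  simp only [List.mem_map, List.mem_range] at hx
  obtain ⟨k, hk, rfl⟩ := hx
  simp; omega

theorem rotL_ne_nil (l : List Int) (hl : l ≠ []) : rotL l ≠ [] := by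
  unfold rotL
  have : 0 < l.length := List.length_pos_iff.mpr hl
  simp [List.range_eq_nil]; omega

-- B's per-session condition decides membership in A's rotation set.
theorem ok_iff (no s : List Int) :
    ((match (if no.length ≠ 0 then some (canonical_rotation no) else none) with
      | some r => s.length == no.length && canonical_rotation s == r
      | none => false) = true) ↔ s ∈ rotL no := by
  by_cases hno : no.length = 0
  · have : no = [] := List.length_eq_zero_iff.mp hno
    subst this
    simp [rotL]
  · have hne : no ≠ [] := fun h => hno (by simp [h])
    rw [if_pos hno]
    simp only [Bool.and_eq_true, beq_iff_eq]
    constructor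
    · rintro ⟨hlen, hcan⟩
      have hs : s ≠ [] := fun h => hno (by simp [h] at hlen; omega)
      have hsmem : s ~r lminL (rotL s) :=
        (mem_rotL_iff s _ hs).mp (lminL_mem _ (rotL_ne_nil s hs))
      have hnomem : no ~r lminL (rotL no) :=
        (mem_rotL_iff no _ hne).mp (lminL_mem _ (rotL_ne_nil no hne))
      rw [mem_rotL_iff no s hne]
      rw [canon_eq, canon_eq] at hcan
      exact hnomem.trans (hcan ▸ hsmem).symm
    · intro hmem
      have hlen := length_of_mem_rotL no s hmem
      have hs : s ≠ [] := fun h => hno (by rw [← hlen, h]; rfl)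
      have hros : no ~r s := (mem_rotL_iff no s hne).mp hmem
      refine ⟨by simp [hlen], ?_⟩
      rw [canon_eq, canon_eq]
      refine lminL_eq_of_same_mem _ _ (rotL_ne_nil s hs) (rotL_ne_nil no hne) ?_
      intro x
      rw [mem_rotL_iff s x hs, mem_rotL_iff no x hne]
      exact ⟨fun h => hros.trans h, fun h => hros.symm.trans h⟩

-- fold equality: A's triple-state fold projected = B's pair-state fold, given that the
-- conditions agree pointwise.
theorem fold_eq (no : List Int) (sl : List (List Int)) (cond : List Int → Bool)
    (hc : ∀ s, cond s = true ↔ s ∈ rotL no)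
    (l : List (Int × List Int)) (a : List (List Int)) (b : List Int) (c : List (List Int)) :
    ((l.foldl (fun (st : List (List Int) × List Int × List (List Int)) p =>
        if p.2 ∉ rotL no then
          (st.1 ++ [p.2], st.2.1 ++ [p.1], st.2.2 ++ [PySem.List.pyGetD sl p.1 ([] : List Int)])
        else st) (a, b, c)).1,
     (l.foldl (fun (st : List (List Int) × List Int × List (List Int)) p =>
        if p.2 ∉ rotL no then
          (st.1 ++ [p.2], st.2.1 ++ [p.1], st.2.2 ++ [PySem.List.pyGetD sl p.1 ([] : List Int)])
        else st) (a, b, c)).2.2) =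
    l.foldl (fun (st : List (List Int) × List (List Int)) p =>
        if !(cond p.2) then
          (st.1 ++ [p.2], st.2 ++ [PySem.List.pyGetD sl p.1 ([] : List Int)])
        else st) (a, c) := by
  induction l generalizing a b c with
  | nil => rfl
  | cons p l ih =>
    simp only [List.foldl_cons]
    by_cases h : cond p.2 = true
    · rw [if_neg (by simp [(hc p.2).mp h]), if_neg (by simp [h])]
      exact ih a b c
    · have hm : p.2 ∉ rotL no := fun hmem => h ((hc p.2).mpr hmem)
      rw [if_pos hm, if_pos (by simp [Bool.not_eq_true] at h ⊢; exact h)]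
      exact ih _ _ _

-- ===== VERDICT (by name: the statement is the Claim_ definition above) =====
theorem detect_anomaly_event_cycles_spec : Claim_equal_detect_anomaly_event_cycles := by
  intro sessions no sl _ _
  unfold Spec_detect_anomaly_event_cycles detect_anomaly_event_cycles detect_anomaly_event_cycles_alt
  simp only [rotations_eq]
  exact fold_eq no sl
    (fun s => (match (if no.length ≠ 0 then some (canonical_rotation no) else none) with
      | some r => s.length == no.length && canonical_rotation s == r
      | none => false))
    (fun s => ok_iff no s)
    (PySem.List.enumerate sessions 0) [] [] []
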